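-- pv_equiv track=rewrite | github.com/EronDS/Bioinformatics | BioinformaticsAlgorithms/BioinformaticsI/Week2/Week2.py | MaximumSkew
-- ===== SOURCE A (Python) =====
-- def MaximumSkew(seq):
--     """
--     Finding the maximum location of Skew
--     """
--     skew = 0
--     skewness = []
--     skewness.append(skew)
--     skew_dict = {}
--     skew_dict[skew] = skew
--     count = 0
--     for nucl in seq:
--         if nucl == 'C':
--             skew -= 1
--             count += 1
--             skew_dict[count]  = skew
--
--         if nucl == 'G':
--             skew += 1
--             count += 1
--             skew_dict[count] = skew
--
--         if nucl == 'A' or nucl == 'T':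
--             count += 1
--             skew_dict[count] = skew
--
--     max_v = max(skew_dict.values())
--     max_keys = []
--     for key in skew_dict:
--         if skew_dict[key] >= max_v:
--             max_keys.append(key)
--
--
--     return max_keys
-- ===== SOURCE B (Python) =====
-- def MaximumSkew(seq):
--     """
--     Finding the maximum location of Skew
--     """
--     skew = 0
--     pos = 0
--     best = 0
--     result = [0]
--     for nucl in seq:
--         if nucl == 'C':
--             skew -= 1
--         elif nucl == 'G':
--             skew += 1
--         elif nucl != 'A' and nucl != 'T':
--             continue  # non-ACGT characters do not advance the position
--         pos += 1
--         if skew > best: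
--             best = skew
--             result = [pos]
--         elif skew == best:
--             result.append(pos)
--     return result
-- ===== Notes on version B (the rewrite author's own statement) =====
-- stated objective: simpler
-- what changed: B replaces A's dict-of-all-skew-values plus max() plus a second rescan-for-argmax loop by a single pass that keeps only the running skew, the running maximum and the current list of winning positions.
import Mathlib
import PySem

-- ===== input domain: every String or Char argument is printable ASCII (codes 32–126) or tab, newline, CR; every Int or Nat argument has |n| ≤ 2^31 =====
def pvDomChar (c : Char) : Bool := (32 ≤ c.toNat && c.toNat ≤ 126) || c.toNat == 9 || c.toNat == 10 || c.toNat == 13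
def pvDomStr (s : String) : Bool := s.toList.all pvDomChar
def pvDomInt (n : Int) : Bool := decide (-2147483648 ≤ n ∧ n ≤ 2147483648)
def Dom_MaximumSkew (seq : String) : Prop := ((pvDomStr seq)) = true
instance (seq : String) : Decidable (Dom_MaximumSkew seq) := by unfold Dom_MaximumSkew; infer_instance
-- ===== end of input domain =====

-- B replaces A's build-a-skew-dict-then-rescan structure by a single pass that keeps only the
-- running skew, the running maximum and the current winning positions (objective: simpler).

-- ===== PORT A =====
-- state: (skew, count, skew_dict)
def aStep (st : Int × Int × PySem.Dict Int Int) (c : Char) : Int × Int × PySem.Dict Int Int :=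
  let st := if c = 'C' then (st.1 - 1, st.2.1 + 1, st.2.2.insert (st.2.1 + 1) (st.1 - 1)) else st
  let st := if c = 'G' then (st.1 + 1, st.2.1 + 1, st.2.2.insert (st.2.1 + 1) (st.1 + 1)) else st
  let st := if c = 'A' ∨ c = 'T' then (st.1, st.2.1 + 1, st.2.2.insert (st.2.1 + 1) st.1) else st
  st

def MaximumSkew (seq : String) : List Int :=
  let r := seq.toList.foldl aStep (0, 0, (PySem.Dict.empty).insert 0 0)
  let d := r.2.2
  match PySem.List.max? (PySem.Dict.values d) (fun v => v) with
  | none => []  -- unreachable: skew_dict always holds key 0, so values is nonempty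
  | some m =>
    (PySem.Dict.keys d).foldl (fun acc k =>
      match d.get? k with
      | some v => if v ≥ m then acc ++ [k] else acc
      | none => acc) []  -- none unreachable: k is a key of d

-- ===== PORT B =====
-- state: (skew, pos, best, result)
def bStep (st : Int × Int × Int × List Int) (c : Char) : Int × Int × Int × List Int :=
  if c = 'C' ∨ c = 'G' ∨ c = 'A' ∨ c = 'T' then
    let skew := if c = 'C' then st.1 - 1 else if c = 'G' then st.1 + 1 else st.1
    let pos := st.2.1 + 1
    if st.2.2.1 < skew then (skew, pos, skew, [pos])
    else if skew = st.2.2.1 then (skew, pos, st.2.2.1, st.2.2.2 ++ [pos])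
    else (skew, pos, st.2.2.1, st.2.2.2)
  else st

def MaximumSkew_alt (seq : String) : List Int :=
  (seq.toList.foldl bStep (0, 0, 0, [0])).2.2.2

-- ===== PRECONDITION & SPEC =====
def Spec_MaximumSkew (seq : String) (out : List Int) : Prop := out = MaximumSkew_alt seq
instance (seq : String) (out : List Int) : Decidable (Spec_MaximumSkew seq out) := by unfold Spec_MaximumSkew; infer_instance

-- ===== CLAIM (what is proved, stated in full; the proofs are below) =====
def Claim_equal_MaximumSkew : Prop := ∀ (seq : String), Dom_MaximumSkew seq → Spec_MaximumSkew seq (MaximumSkew seq)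

-- ===== LEMMAS AND PROOFS =====

-- the list of skew values recorded for the nucleotides of cs, starting from skew s
def skews : List Char → Int → List Int
  | [], _ => []
  | c :: cs, s =>
    if c = 'C' ∨ c = 'G' ∨ c = 'A' ∨ c = 'T' then
      (if c = 'C' then s - 1 else if c = 'G' then s + 1 else s) ::
        skews cs (if c = 'C' then s - 1 else if c = 'G' then s + 1 else s)
    else skews cs s

-- pair each value with its position n+1, n+2, …
def tag : Int → List Int → List (Int × Int)
  | _, [] => []
  | n, v :: vs => (n + 1, v) :: tag (n + 1) vs

lemma mem_tag {p : Int × Int} : ∀ (vs : List Int) (n : Int), p ∈ tag n vs → n < p.1 ∧ p.2 ∈ vs := by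
  intro vs
  induction vs with
  | nil => intro n h; simp [tag] at h
  | cons v vs ih =>
    intro n h
    simp only [tag, List.mem_cons] at h
    rcases h with h | h
    · subst h; simp
    · rcases ih (n + 1) h with ⟨h1, h2⟩
      exact ⟨by omega, by simp [h2]⟩

lemma tag_keys_nodup : ∀ (vs : List Int) (n : Int), ((tag n vs).map (·.1)).Nodup := by
  intro vs
  induction vs with
  | nil => intro n; simp [tag]
  | cons v vs ih =>
    intro n
    simp only [tag, List.map_cons, List.nodup_cons]
    refine ⟨?_, ih (n + 1)⟩
    intro h
    rcases List.mem_map.mp h with ⟨p, hp, hp1⟩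
    have := (mem_tag vs (n + 1) hp).1
    omega

-- A's loop appends exactly the tagged skew values to the dict
lemma A_fold_items : ∀ (cs : List Char) (s n : Int) (d : PySem.Dict Int Int),
    (∀ k ∈ d.keys, k ≤ n) →
    ((cs.foldl aStep (s, n, d)).2.2).items = d.items ++ tag n (skews cs s) := by
  intro cs
  induction cs with
  | nil => intro s n d _; simp [skews, tag]
  | cons c cs ih =>
    intro s n d h
    by_cases hN : c = 'C' ∨ c = 'G' ∨ c = 'A' ∨ c = 'T'
    · have hstep : aStep (s, n, d) c =
          ((if c = 'C' then s - 1 else if c = 'G' then s + 1 else s), n + 1,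
            d.insert (n + 1) (if c = 'C' then s - 1 else if c = 'G' then s + 1 else s)) := by
        rcases hN with h1 | h1 | h1 | h1 <;> subst h1 <;> simp [aStep]
      have hcon : d.contains (n + 1) = false := by
        rw [PySem.Dict.contains_eq_decide_mem_keys]
        simp only [decide_eq_false_iff_not]
        intro hm; have := h _ hm; omega
      simp only [List.foldl_cons, hstep]
      rw [ih _ (n + 1) _ (by
        intro k hk
        simp only [PySem.Dict.mem_keys_insert] at hk
        rcases hk with h1 | h1
        · omega
        · have := h _ h1; omega)]
      simp only [PySem.Dict.items_insert, hcon, Bool.false_eq_true, if_false]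
      simp only [skews, if_pos hN, tag, List.append_assoc, List.cons_append, List.nil_append]
    · have hstep : aStep (s, n, d) c = (s, n, d) := by
        simp only [not_or] at hN
        simp [aStep, hN.1, hN.2.1, hN.2.2.1, hN.2.2.2]
      simp only [List.foldl_cons, hstep, skews, if_neg hN]
      exact ih s n d h

-- B's loop is the argmax scan of the skew values
def scanA : List Int → Int → Int → List Int → (Int × List Int)
  | [], _, b, r => (b, r)
  | v :: vs, n, b, r =>
    if b < v then scanA vs (n + 1) v [n + 1]
    else if v = b then scanA vs (n + 1) b (r ++ [n + 1])
    else scanA vs (n + 1) b r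

lemma bStep_nucl {c : Char} (hN : c = 'C' ∨ c = 'G' ∨ c = 'A' ∨ c = 'T')
    (s n b : Int) (r : List Int) :
    bStep (s, n, b, r) c =
      (if b < (if c = 'C' then s - 1 else if c = 'G' then s + 1 else s) then
        ((if c = 'C' then s - 1 else if c = 'G' then s + 1 else s), n + 1,
          (if c = 'C' then s - 1 else if c = 'G' then s + 1 else s), [n + 1])
      else if (if c = 'C' then s - 1 else if c = 'G' then s + 1 else s) = b then
        ((if c = 'C' then s - 1 else if c = 'G' then s + 1 else s), n + 1, b, r ++ [n + 1])
      else ((if c = 'C' then s - 1 else if c = 'G' then s + 1 else s), n + 1, b, r)) := by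
  simp only [bStep, if_pos hN]

lemma B_fold_scan : ∀ (cs : List Char) (s n b : Int) (r : List Int),
    (cs.foldl bStep (s, n, b, r)).2.2 = scanA (skews cs s) n b r := by
  intro cs
  induction cs with
  | nil => intro s n b r; simp [skews, scanA]
  | cons c cs ih =>
    intro s n b r
    by_cases hN : c = 'C' ∨ c = 'G' ∨ c = 'A' ∨ c = 'T'
    · simp only [List.foldl_cons, bStep_nucl hN, skews, if_pos hN, scanA]
      by_cases hlt : b < (if c = 'C' then s - 1 else if c = 'G' then s + 1 else s)
      · rw [if_pos hlt, if_pos hlt, ih]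
      · rw [if_neg hlt, if_neg hlt]
        by_cases heq : (if c = 'C' then s - 1 else if c = 'G' then s + 1 else s) = b
        · rw [if_pos heq, if_pos heq, ih]
        · rw [if_neg heq, if_neg heq, ih]
    · have hstep : bStep (s, n, b, r) c = (s, n, b, r) := by
        simp [bStep, hN]
      simp only [List.foldl_cons, hstep, skews, if_neg hN]
      exact ih s n b r

lemma scanA_spec : ∀ (vs : List Int) (n b : Int) (r : List Int),
    scanA vs n b r =
      (vs.foldl max b,
        (if b = vs.foldl max b then r else []) ++
          ((tag n vs).filter (fun p => decide (p.2 = vs.foldl max b))).map (·.1)) := by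
  intro vs
  induction vs with
  | nil => intro n b r; simp [scanA, tag]
  | cons v vs ih =>
    intro n b r
    simp only [scanA, List.foldl_cons, tag, List.filter_cons]
    by_cases hlt : b < v
    · rw [if_pos hlt, ih]
      simp only [max_eq_right (le_of_lt hlt)]
      have hbM : b ≠ vs.foldl max v := by
        have := (PySem.List.le_foldl_max vs v).1
        omega
      rw [if_neg hbM]
      by_cases hvM : v = vs.foldl max v
      · rw [if_pos hvM, if_pos (by simpa using hvM)]
        simp only [List.map_cons, List.nil_append, List.singleton_append]
      · rw [if_neg hvM, if_neg (by simpa using hvM)]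
    · rw [if_neg hlt]
      by_cases heq : v = b
      · rw [if_pos heq, ih]
        subst heq
        simp only [max_self]
        by_cases hbM : v = vs.foldl max v
        · rw [if_pos hbM, if_pos hbM, if_pos (by simpa using hbM)]
          simp only [List.map_cons, List.append_assoc, List.singleton_append]
        · rw [if_neg hbM, if_neg hbM, if_neg (by simpa using hbM)]
      · rw [if_neg heq, ih]
        have hvb : v < b := by omega
        have hbMle : b ≤ vs.foldl max b := (PySem.List.le_foldl_max vs b).1
        have hmax : max b v = b := max_eq_left (le_of_lt hvb)
        simp only [hmax]
        have hvM : ¬ (v = vs.foldl max b) := by omega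
        rw [if_neg (show ¬(decide (v = vs.foldl max b) = true) by simpa using hvM)]

lemma tag_snd : ∀ (vs : List Int) (n : Int), (tag n vs).map (·.2) = vs := by
  intro vs
  induction vs with
  | nil => intro n; simp [tag]
  | cons v vs ih => intro n; simp [tag, ih]

-- ===== VERDICT (by name: the statement is the Claim_ definition above) =====
theorem MaximumSkew_spec : Claim_equal_MaximumSkew := by
  intro seq _
  simp only [Spec_MaximumSkew, MaximumSkew, MaximumSkew_alt]
  have hkey0 : ∀ k ∈ (PySem.Dict.empty.insert (0 : Int) (0 : Int)).keys, k ≤ (0 : Int) := by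
    intro k hk
    simp only [PySem.Dict.mem_keys_insert, PySem.Dict.keys_empty] at hk
    simp at hk
    omega
  have hitems := A_fold_items seq.toList 0 0 _ hkey0
  set d := (seq.toList.foldl aStep (0, 0, PySem.Dict.empty.insert 0 0)).2.2 with hd
  set vs := skews seq.toList 0 with hvs
  have he : (PySem.Dict.empty.insert (0 : Int) (0 : Int)).items = [((0 : Int), (0 : Int))] := by
    decide
  have hitems' : d.items = (0, 0) :: tag 0 vs := by
    rw [hitems, he, List.singleton_append]
  have hvals : d.values = 0 :: vs := by
    simp only [PySem.Dict.values, hitems', List.map_cons, tag_snd]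
  split
  next hnone =>
    rw [hvals] at hnone
    simp [PySem.List.max?_eq_none_iff] at hnone
  next m hsome =>
    rw [hvals, PySem.List.max?_id_cons] at hsome
    have hm : vs.foldl max 0 = m := Option.some.inj hsome
    have h0m : (0 : Int) ≤ m := hm ▸ (PySem.List.le_foldl_max vs 0).1
    have hvm : ∀ y ∈ vs, y ≤ m := fun y hy => hm ▸ (PySem.List.le_foldl_max vs 0).2 y hy
    have hnd : (PySem.Dict.keys d).Nodup := by
      have hkeys : PySem.Dict.keys d = (0 : Int) :: (tag 0 vs).map (·.1) := by
        simp only [PySem.Dict.keys, hitems', List.map_cons]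
      rw [hkeys]
      refine List.nodup_cons.mpr ⟨?_, tag_keys_nodup vs 0⟩
      intro h0
      rcases List.mem_map.mp h0 with ⟨p, hp, hp1⟩
      have := (mem_tag vs 0 hp).1
      omega
    have hloop : (PySem.Dict.keys d).foldl (fun acc k =>
        match d.get? k with
        | some v => if v ≥ m then acc ++ [k] else acc
        | none => acc) [] =
        (d.items.filter (fun p => decide (p.2 ≥ m))).map (·.1) := by
      conv_lhs => rw [show PySem.Dict.keys d = d.items.map (·.1) from rfl]
      rw [List.foldl_map]
      have hcongr := PySem.List.foldl_congr_mem (l := d.items) (init := ([] : List Int))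
        (f := fun acc p => match d.get? p.1 with
          | some v => if v ≥ m then acc ++ [p.1] else acc
          | none => acc)
        (g := fun acc p => if p.2 ≥ m then acc ++ [p.1] else acc)
        (by
          intro acc p hp
          obtain ⟨k, v⟩ := p
          simp [PySem.Dict.get?_of_mem_items d hp hnd])
      rw [hcongr, PySem.List.foldl_append_ite (p := fun p : Int × Int => p.2 ≥ m) (f := (·.1))]
      simp
    rw [hloop, hitems']
    have hB := B_fold_scan seq.toList 0 0 0 [0]
    rw [← hvs] at hB
    have hB2 : (List.foldl bStep (0, 0, 0, [0]) seq.toList).2.2.2 = (scanA vs 0 0 [0]).2 :=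
      congrArg Prod.snd hB
    rw [hB2, scanA_spec]
    simp only [hm]
    rw [List.filter_cons]
    have htail : (tag 0 vs).filter (fun p => decide (p.2 ≥ m)) =
        (tag 0 vs).filter (fun p => decide (p.2 = m)) := by
      apply List.filter_congr
      intro p hp
      have := hvm _ (mem_tag vs 0 hp).2
      simp only [decide_eq_decide]
      omega
    rw [htail]
    by_cases h0 : (0 : Int) = m
    · simp [← h0]
    · have hge : ¬ ((0 : Int) ≥ m) := by omega
      simp [hge, h0]
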